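-- pv_equiv track=rewrite | github.com/pctablet505/HackerRank | Mathematics/Sherlock and GCD.py | solve
-- ===== SOURCE A (Python) =====
-- from math import gcd
--
-- def solve(a):
--     n = len(a)
--     for i in range(n):
--         s = set()
--         x = a[i]
--         for j in range(i + 1, n):
--             x = gcd(x, a[j])
--             if x == 1:
--                 return "YES"
--     return 'NO'
-- ===== SOURCE B (Python) =====
-- from math import gcd
--
-- def solve(a):
--     g = 0
--     for v in a:
--         g = gcd(g, v)
--     return "YES" if g == 1 else "NO"
-- ===== Notes on version B (the rewrite author's own statement) =====
-- stated objective: faster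
-- what changed: Replaces the quadratic scan over all start indices with a single fold computing the gcd of the whole array (a subarray with gcd 1 exists iff the whole-array gcd is 1).
-- intended difference: On a singleton list [x] with |x| = 1, A returns 'NO' because its inner loop needs at least two elements before it checks the gcd, while B returns 'YES', the intended answer since the one-element subarray already has gcd 1. — e.g. on solve([1]): A returns "NO", B returns "YES"
import Mathlib
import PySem

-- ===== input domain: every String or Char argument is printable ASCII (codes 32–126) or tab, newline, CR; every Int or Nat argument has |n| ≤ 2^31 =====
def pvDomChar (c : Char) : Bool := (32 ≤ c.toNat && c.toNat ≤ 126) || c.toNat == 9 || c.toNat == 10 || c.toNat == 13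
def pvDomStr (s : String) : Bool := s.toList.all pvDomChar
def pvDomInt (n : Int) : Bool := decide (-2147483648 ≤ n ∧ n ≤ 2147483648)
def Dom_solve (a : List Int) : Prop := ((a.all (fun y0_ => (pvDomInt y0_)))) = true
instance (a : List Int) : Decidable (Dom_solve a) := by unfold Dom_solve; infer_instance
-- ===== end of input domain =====

-- B replaces A's quadratic scan of all start indices by one gcd fold over the whole array;
-- B answers 'YES' on singleton [±1] where A answers 'NO' (stated in D_solve below).

-- ===== PORT A =====
-- inner loop: x = gcd(x, a[j]); if x == 1: return "YES"   (the unused 's = set()' is dead code, dropped)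
def solveInnerA (x : Int) : List Int → Bool
  | [] => false
  | y :: ys =>
    let x' : Int := (Int.gcd x y : Int)   -- math.gcd: nonnegative gcd of absolute values
    if x' = 1 then true else solveInnerA x' ys

-- outer loop over start index i, realised as recursion over the tails a[i:], a[i] = head
def solveOuterA : List Int → Bool
  | [] => false
  | x :: rest => if solveInnerA x rest then true else solveOuterA rest

def solve (a : List Int) : String :=
  if solveOuterA a then "YES" else "NO"

-- ===== PORT B =====
def solve_alt (a : List Int) : String :=
  let g : Int := a.foldl (fun g v => (Int.gcd g v : Int)) 0
  if g = 1 then "YES" else "NO"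

-- ===== PRECONDITION & SPEC =====
-- On singleton lists [x] with |x| = 1, A returns "NO" (its gcd check only fires after combining
-- two elements) while B returns "YES", the intended answer: the one-element subarray has gcd 1.
def D_solve (a : List Int) : Prop := a.length = 1 ∧ a.headI.natAbs = 1
instance (a : List Int) : Decidable (D_solve a) := by unfold D_solve; infer_instance

def Spec_solve (a : List Int) (out : String) : Prop := ¬ D_solve a → out = solve_alt a
instance (a : List Int) (out : String) : Decidable (Spec_solve a out) := by unfold Spec_solve; infer_instance

def pvDiffWitness_solve : List Int := [1]
def pvDiffWitnessOut_solve : String × String := ("NO", "YES")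

-- ===== CLAIM (what is proved, stated in full; the proofs are below) =====
def Claim_unchanged_solve : Prop := ∀ (a : List Int), Dom_solve a → Spec_solve a (solve a)
def Claim_changed_solve : Prop := Dom_solve (pvDiffWitness_solve) ∧ D_solve (pvDiffWitness_solve) ∧ solve (pvDiffWitness_solve) = pvDiffWitnessOut_solve.1 ∧ solve_alt (pvDiffWitness_solve) = pvDiffWitnessOut_solve.2 ∧ pvDiffWitnessOut_solve.1 ≠ pvDiffWitnessOut_solve.2
def Claim_exact_solve : Prop := ∀ (a : List Int), Dom_solve a → D_solve a → solve a ≠ solve_alt a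

-- ===== LEMMAS AND PROOFS =====

-- the gcd fold, expressed over natural numbers
def nfold (s : Nat) (l : List Int) : Nat := l.foldl (fun g y => Nat.gcd g y.natAbs) s

lemma foldl_int_eq_nfold (l : List Int) (s : Nat) :
    l.foldl (fun g v => ((Int.gcd g v : Nat) : Int)) (s : Int) = (nfold s l : Int) := by
  induction l generalizing s with
  | nil => rfl
  | cons y t ih =>
    simp only [nfold, List.foldl] at *
    rw [show ((Int.gcd (s : Int) y : Nat) : Int) = ((Nat.gcd s y.natAbs : Nat) : Int) by
      simp [Int.gcd]]
    exact ih _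

lemma nfold_seed (l : List Int) (s : Nat) : nfold s l = Nat.gcd s (nfold 0 l) := by
  induction l generalizing s with
  | nil => simp [nfold]
  | cons y t ih =>
    simp only [nfold, List.foldl] at *
    rw [ih (Nat.gcd s y.natAbs), ih (Nat.gcd 0 y.natAbs)]
    simp [Nat.gcd_assoc]

lemma inner_iff (x : Int) (ys : List Int) (h : ys ≠ []) :
    solveInnerA x ys = true ↔ Nat.gcd x.natAbs (nfold 0 ys) = 1 := by
  induction ys generalizing x with
  | nil => exact absurd rfl h
  | cons y t ih =>
    simp only [solveInnerA]
    have hx' : ((Int.gcd x y : Nat) : Int).natAbs = Nat.gcd x.natAbs y.natAbs := by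
      simp [Int.gcd]
    have hfold : nfold 0 (y :: t) = Nat.gcd y.natAbs (nfold 0 t) := by
      have := nfold_seed t (Nat.gcd 0 y.natAbs)
      simpa [nfold, List.foldl] using this
    by_cases h1 : ((Int.gcd x y : Nat) : Int) = 1
    · have h1' : Nat.gcd x.natAbs y.natAbs = 1 := by
        have := congrArg Int.natAbs h1
        simpa [hx'] using this
      rw [if_pos h1]
      refine iff_of_true rfl ?_
      rw [hfold, ← Nat.gcd_assoc, h1']
      simp
    · rw [if_neg h1]
      cases t with
      | nil =>
        simp only [solveInnerA, Bool.false_eq_true, false_iff]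
        intro hc
        apply h1
        rw [hfold] at hc
        simp only [nfold, List.foldl, Nat.gcd_zero_right] at hc
        have h2 : (Int.gcd x y : Nat) = 1 := by simpa [Int.gcd] using hc
        exact_mod_cast congrArg (fun n : Nat => (n : Int)) h2
      | cons z u =>
        rw [ih _ (by simp)]
        rw [hfold, hx', Nat.gcd_assoc]

lemma outer_iff (a : List Int) :
    solveOuterA a = true ↔ 2 ≤ a.length ∧ nfold 0 a = 1 := by
  induction a with
  | nil => simp [solveOuterA]
  | cons x rest ih =>
    have hfold : nfold 0 (x :: rest) = Nat.gcd x.natAbs (nfold 0 rest) := by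
      have := nfold_seed rest (Nat.gcd 0 x.natAbs)
      simpa [nfold, List.foldl] using this
    cases rest with
    | nil =>
      simp [solveOuterA, solveInnerA]
    | cons y t =>
      have hstep : solveOuterA (x :: y :: t)
          = (if solveInnerA x (y :: t) then true else solveOuterA (y :: t)) := rfl
      rw [hstep]
      by_cases hin : solveInnerA x (y :: t) = true
      · rw [if_pos hin]
        exact iff_of_true rfl ⟨by simp, by
          rw [hfold]; exact (inner_iff x (y :: t) (by simp)).mp hin⟩
      · rw [if_neg hin, ih]
        constructor
        · rintro ⟨-, hg⟩
          exact absurd ((inner_iff x (y :: t) (by simp)).mpr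
            (by rw [hg]; simp)) hin
        · rintro ⟨-, hg⟩
          exact absurd ((inner_iff x (y :: t) (by simp)).mpr
            (hfold.symm.trans hg)) hin

lemma alt_char (a : List Int) : solve_alt a = if nfold 0 a = 1 then "YES" else "NO" := by
  unfold solve_alt
  have := foldl_int_eq_nfold a 0
  simp only [Nat.cast_zero] at this
  rw [this]
  by_cases h : nfold 0 a = 1
  · simp [h]
  · rw [if_neg h, if_neg (by exact_mod_cast h)]

-- ===== VERDICT (by name: the statement is the Claim_ definition above) =====
theorem solve_spec : Claim_unchanged_solve := by
  intro a _ hnD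
  rw [alt_char]
  unfold solve
  cases a with
  | nil => simp [solveOuterA, nfold]
  | cons x rest =>
    cases rest with
    | nil =>
      have hx : x.natAbs ≠ 1 := by
        intro hc; exact hnD ⟨rfl, by simpa using hc⟩
      have : nfold 0 [x] ≠ 1 := by
        simpa [nfold, List.foldl] using hx
      simp [solveOuterA, solveInnerA, this]
    | cons y t =>
      by_cases hg : nfold 0 (x :: y :: t) = 1
      · rw [if_pos hg, if_pos ((outer_iff _).mpr ⟨by simp, hg⟩)]
      · rw [if_neg hg]
        rw [if_neg (by intro hc; exact hg ((outer_iff _).mp hc).2)]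

theorem solve_changed : Claim_changed_solve := by unfold Claim_changed_solve; decide

theorem solve_tight : Claim_exact_solve := by
  intro a _ hD
  obtain ⟨hlen, habs⟩ := hD
  match a, hlen with
  | [x], _ =>
    have hN : nfold 0 [x] = 1 := by simpa [nfold, List.foldl] using habs
    rw [alt_char, if_pos hN]
    simp [solve, solveOuterA, solveInnerA]
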